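-- pv_equiv track=rewrite | github.com/nbebic/TinyPenetrator | src/parser/expression.py | is_factor
-- ===== SOURCE A (Python) =====
-- def is_factor(expr):
--     brackets = 0
--     operators = 0
--     for c in expr:
--         if c == "(":
--             brackets += 1
--         if c == ")":
--             brackets -= 1
--         if c in "+-*/" and brackets == 0:
--             operators += 1
--     return operators == 0
-- ===== SOURCE B (Python) =====
-- def is_factor(expr):
--     return all(expr[:i + 1].count('(') != expr[:i + 1].count(')')
--                for i, c in enumerate(expr) if c in '+-*/')
-- ===== Notes on version B (the rewrite author's own statement) =====
-- stated objective: alternative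
-- what changed: Dropped A's running (brackets, operators) accumulator state entirely: B tests each operator position independently by re-counting '(' and ')' in the prefix up to it (depth-0 iff the prefix counts are equal), an O(n^2) stateless per-position check instead of A's O(n) fused counting loop.
import Mathlib
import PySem

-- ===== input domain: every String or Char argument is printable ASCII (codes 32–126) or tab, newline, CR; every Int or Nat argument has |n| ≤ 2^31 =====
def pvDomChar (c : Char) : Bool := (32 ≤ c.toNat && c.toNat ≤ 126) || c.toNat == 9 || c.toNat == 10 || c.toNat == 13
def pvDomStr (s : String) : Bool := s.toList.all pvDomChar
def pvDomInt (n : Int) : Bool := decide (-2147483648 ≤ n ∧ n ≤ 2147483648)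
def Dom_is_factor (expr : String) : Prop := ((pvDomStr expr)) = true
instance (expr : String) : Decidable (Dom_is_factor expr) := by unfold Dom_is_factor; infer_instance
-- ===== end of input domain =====

-- B drops A's running (brackets, operators) accumulator: each operator position is judged
-- independently by re-counting '(' and ')' in its prefix; objective: alternative (stateless, O(n^2)).

-- ===== PORT A =====
-- literal transliteration of A: one fold carrying (brackets, operators); 'c in "+-*/"' is exact as list membership of the char
def is_factor (expr : String) : Bool :=
  let r := expr.toList.foldl (fun (s : Int × Int) c =>
    let b := if c = '(' then s.1 + 1 else s.1
    let b := if c = ')' then b - 1 else b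
    let o := if ("+-*/".toList.contains c && b == 0) then s.2 + 1 else s.2
    (b, o)) (0, 0)
  r.2 == 0

-- ===== PORT B =====
-- all(expr[:i+1].count('(') != expr[:i+1].count(')') for i, c in enumerate(expr) if c in '+-*/');
-- expr[:i+1] with i ≥ 0 is exactly 'take (i+1)', and str.count of a single char is List.count of that char
def is_factor_alt (expr : String) : Bool :=
  (PySem.List.enumerate expr.toList).all (fun p =>
    if "+-*/".toList.contains p.2 then
      !((expr.toList.take (p.1.toNat + 1)).count '(' == (expr.toList.take (p.1.toNat + 1)).count ')')
    else true)

-- ===== PRECONDITION & SPEC =====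
def Spec_is_factor (expr : String) (out : Bool) : Prop := out = is_factor_alt expr
instance (expr : String) (out : Bool) : Decidable (Spec_is_factor expr out) := by unfold Spec_is_factor; infer_instance

-- ===== CLAIM (what is proved, stated in full; the proofs are below) =====
def Claim_equal_is_factor : Prop := ∀ (expr : String), Dom_is_factor expr → Spec_is_factor expr (is_factor expr)

-- ===== LEMMAS AND PROOFS =====

def pvOp (c : Char) : Bool := "+-*/".toList.contains c

def pvDelta (c : Char) : Int := if c = '(' then 1 else if c = ')' then -1 else 0

def pvDSum (l : List Char) : Int := (l.map pvDelta).sum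

def pvStepA (s : Int × Int) (c : Char) : Int × Int :=
  let b := if c = '(' then s.1 + 1 else s.1
  let b := if c = ')' then b - 1 else b
  let o := if ("+-*/".toList.contains c && b == 0) then s.2 + 1 else s.2
  (b, o)

-- the count of "bad" (top-level operator) positions seen from depth d
def pvBadCount : List Char → Int → Nat
  | [], _ => 0
  | c :: t, d => (if pvOp c && (d + pvDelta c == 0) then 1 else 0) + pvBadCount t (d + pvDelta c)

theorem pv_foldA (cs : List Char) : ∀ (b o : Int),
    cs.foldl pvStepA (b, o) = (b + pvDSum cs, o + (pvBadCount cs b : Int)) := by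
  induction cs with
  | nil => intro b o; simp [pvDSum, pvBadCount]
  | cons c t ih =>
    intro b o
    have hd : pvStepA (b, o) c =
        (b + pvDelta c, if pvOp c && (b + pvDelta c == 0) then o + 1 else o) := by
      by_cases h1 : c = '(' <;> by_cases h2 : c = ')' <;>
        simp_all [pvStepA, pvOp, pvDelta]
      ring_nf
    simp only [List.foldl_cons, hd, ih, pvDSum, pvBadCount, List.map_cons, List.sum_cons]
    rw [Prod.mk.injEq]
    refine ⟨by ring, ?_⟩
    split_ifs <;> push_cast <;> ring

theorem pv_dsum_count (l : List Char) :
    pvDSum l = (l.count '(' : Int) - (l.count ')' : Int) := by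
  induction l with
  | nil => simp [pvDSum]
  | cons c t ih =>
    simp only [pvDSum, List.map_cons, List.sum_cons, List.count_cons] at *
    by_cases h1 : c = '(' <;> by_cases h2 : c = ')' <;>
      simp_all [pvDelta] <;> ring

theorem pv_badCount_iff (cs : List Char) : ∀ (d : Int),
    (pvBadCount cs d = 0 ↔ ∀ (i : Nat) (h : i < cs.length), pvOp cs[i] → d + pvDSum (cs.take (i + 1)) ≠ 0) := by
  induction cs with
  | nil => intro d; simp [pvBadCount]
  | cons c t ih =>
    intro d
    simp only [pvBadCount]
    constructor
    · intro h i hi hop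
      have h1 : (if pvOp c && (d + pvDelta c == 0) then 1 else 0) = 0 ∧ pvBadCount t (d + pvDelta c) = 0 := by omega
      cases i with
      | zero =>
        simp only [List.getElem_cons_zero] at hop
        simp [hop, pvDSum] at h1 ⊢
        intro hc; exact absurd hc (by simpa [hop] using h1.1)
      | succ j =>
        simp only [List.getElem_cons_succ] at hop
        have := (ih (d + pvDelta c)).mp h1.2 j (by simpa using hi) hop
        simp only [List.take_succ_cons, pvDSum, List.map_cons, List.sum_cons] at *
        intro hc; apply this; omega
    · intro h
      have h0 : (if pvOp c && (d + pvDelta c == 0) then 1 else 0) = 0 := by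
        by_cases hop : pvOp c
        · have := h 0 (by simp) (by simpa using hop)
          simp only [List.take_succ_cons, List.take_zero, pvDSum, List.map_cons, List.map_nil,
            List.sum_cons, List.sum_nil, add_zero] at this
          simp [hop]; omega
        · simp [hop]
      have ht : pvBadCount t (d + pvDelta c) = 0 := by
        apply (ih (d + pvDelta c)).mpr
        intro j hj hop
        have := h (j + 1) (by simpa using hj) (by simpa using hop)
        simp only [List.take_succ_cons, pvDSum, List.map_cons, List.sum_cons] at this ⊢
        omega
      omega

theorem pv_alt_iff (expr : String) :
    is_factor_alt expr = true ↔
      ∀ (i : Nat) (h : i < expr.toList.length), pvOp expr.toList[i] →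
        (0 : Int) + pvDSum (expr.toList.take (i + 1)) ≠ 0 := by
  unfold is_factor_alt
  rw [List.all_eq_true]
  constructor
  · intro h i hi hop
    have hm : ((0 : Int) + i, expr.toList[i]) ∈ PySem.List.enumerate expr.toList 0 := by
      rw [PySem.List.mem_enumerate_iff]; exact ⟨i, hi, rfl⟩
    have := h _ hm
    simp only [zero_add] at this
    rw [if_pos (by simpa [pvOp] using hop)] at this
    simp only [Int.toNat_natCast, Bool.not_eq_eq_eq_not, Bool.not_true, beq_eq_false_iff_ne,
      ne_eq] at this
    rw [pv_dsum_count]; intro hc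
    exact this (by omega)
  · intro h p hp
    rw [PySem.List.mem_enumerate_iff] at hp
    obtain ⟨k, hk, rfl⟩ := hp
    simp only [zero_add]
    by_cases hop : "+-*/".toList.contains expr.toList[k]
    · rw [if_pos hop]
      have := h k hk (by simpa [pvOp] using hop)
      rw [pv_dsum_count] at this
      simp only [Int.toNat_natCast, Bool.not_eq_eq_eq_not, Bool.not_true, beq_eq_false_iff_ne,
        ne_eq]
      intro hc; apply this; omega
    · rw [if_neg hop]

-- ===== VERDICT (by name: the statement is the Claim_ definition above) =====
theorem is_factor_spec : Claim_equal_is_factor := by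
  intro expr _
  unfold Spec_is_factor
  have hA : is_factor expr = (pvBadCount expr.toList 0 == 0) := by
    unfold is_factor
    have : expr.toList.foldl (fun (s : Int × Int) c =>
        let b := if c = '(' then s.1 + 1 else s.1
        let b := if c = ')' then b - 1 else b
        let o := if ("+-*/".toList.contains c && b == 0) then s.2 + 1 else s.2
        (b, o)) (0, 0) = expr.toList.foldl pvStepA (0, 0) := rfl
    rw [this, pv_foldA]
    simp
  rw [hA]
  cases hB : is_factor_alt expr with
  | true =>
    have := (pv_alt_iff expr).mp hB
    have := (pv_badCount_iff expr.toList 0).mpr this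
    simp [this]
  | false =>
    have hne : ¬ (∀ (i : Nat) (h : i < expr.toList.length), pvOp expr.toList[i] →
        (0 : Int) + pvDSum (expr.toList.take (i + 1)) ≠ 0) := by
      intro hall
      exact absurd ((pv_alt_iff expr).mpr hall) (by simp [hB])
    have : pvBadCount expr.toList 0 ≠ 0 := fun h0 =>
      hne ((pv_badCount_iff expr.toList 0).mp h0)
    simpa using this
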